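-- pv_equiv track=rewrite | github.com/Chanakyasinde/Contest_Problems | Python_Problems/max_at_max.py | count_valid_subarrays
-- ===== SOURCE A (Python) =====
-- def count_valid_subarrays(arr, x):
--     n = len(arr)
--     count = 0
--     start = 0
--
--     for end in range(n):
--         if arr[end] > x:
--             start = end + 1
--         else:
--             count += (end - start + 1)
--
--     return count
-- ===== SOURCE B (Python) =====
-- def count_valid_subarrays(arr, x):
--     # Different decomposition: split arr into maximal runs of elements <= x
--     # and add the closed-form L*(L+1)//2 per run.
--     total = 0
--     run = 0
--     for v in arr:
--         if v <= x:
--             run += 1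
--         else:
--             total += run * (run + 1) // 2
--             run = 0
--     return total + run * (run + 1) // 2
-- ===== Notes on version B (the rewrite author's own statement) =====
-- stated objective: alternative
-- what changed: B partitions arr into maximal runs of consecutive elements <= x and sums the closed-form triangular count L*(L+1)//2 per run, instead of A's per-index accumulation of end-start+1 with a sliding start pointer.
import Mathlib
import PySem

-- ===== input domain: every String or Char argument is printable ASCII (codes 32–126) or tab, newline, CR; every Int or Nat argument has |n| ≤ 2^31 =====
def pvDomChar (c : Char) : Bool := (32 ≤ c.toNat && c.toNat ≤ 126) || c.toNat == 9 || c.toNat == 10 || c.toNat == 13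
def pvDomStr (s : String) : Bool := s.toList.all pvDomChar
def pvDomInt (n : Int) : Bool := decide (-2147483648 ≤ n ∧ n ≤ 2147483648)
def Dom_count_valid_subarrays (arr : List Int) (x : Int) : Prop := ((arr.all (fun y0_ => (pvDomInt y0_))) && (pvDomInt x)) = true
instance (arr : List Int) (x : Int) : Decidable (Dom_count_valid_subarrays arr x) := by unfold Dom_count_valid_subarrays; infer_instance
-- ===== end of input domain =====

-- B counts per maximal run of elements ≤ x with the closed form L*(L+1)//2, instead of
-- A's per-index accumulation end-start+1; same cost, different decomposition (objective: alternative).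

-- ===== PORT A =====
-- for end in range(n): if arr[end] > x: start = end+1 else count += end-start+1
-- (arr[end] is always in range here, so pyGetD with default 0 is exact)
def count_valid_subarrays (arr : List Int) (x : Int) : Int :=
  let n : Int := arr.length
  let st := (PySem.List.pyRange 0 n 1).foldl
    (fun (st : Int × Int) (e : Int) =>
      if PySem.List.pyGetD arr e 0 > x then (st.1, e + 1)
      else (st.1 + (e - st.2 + 1), st.2)) (0, 0)
  st.1

-- ===== PORT B =====
-- loop over the values, keeping (total, current run length); on a break add run*(run+1)//2
def cvsRuns : List Int → Int → Int → Int → Int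
  | [], _, total, run => total + PySem.Int.floordiv (run * (run + 1)) 2
  | v :: t, x, total, run =>
    if v ≤ x then cvsRuns t x total (run + 1)
    else cvsRuns t x (total + PySem.Int.floordiv (run * (run + 1)) 2) 0

def count_valid_subarrays_alt (arr : List Int) (x : Int) : Int :=
  cvsRuns arr x 0 0

-- ===== PRECONDITION & SPEC =====
def Spec_count_valid_subarrays (arr : List Int) (x : Int) (out : Int) : Prop := out = count_valid_subarrays_alt arr x
instance (arr : List Int) (x : Int) (out : Int) : Decidable (Spec_count_valid_subarrays arr x out) := by unfold Spec_count_valid_subarrays; infer_instance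

-- ===== CLAIM (what is proved, stated in full; the proofs are below) =====
def Claim_equal_count_valid_subarrays : Prop := ∀ (arr : List Int) (x : Int), Dom_count_valid_subarrays arr x → Spec_count_valid_subarrays arr x (count_valid_subarrays arr x)

-- ===== LEMMAS AND PROOFS =====

-- triangular number, as B computes it
def cvsT (r : Int) : Int := PySem.Int.floordiv (r * (r + 1)) 2

theorem cvsT_succ (r : Int) : cvsT (r + 1) = cvsT r + (r + 1) := by
  unfold cvsT
  have h : (r + 1) * (r + 1 + 1) = r * (r + 1) + (r + 1) * 2 := by ring
  rw [h]
  simp [PySem.Int.floordiv]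
  rw [Int.add_mul_fdiv_right _ _ (by norm_num : (2:Int) ≠ 0)]

theorem cvsRuns_total (arr : List Int) (x t r : Int) :
    cvsRuns arr x t r = t + cvsRuns arr x 0 r := by
  induction arr generalizing t r with
  | nil => simp [cvsRuns]
  | cons v tl ih =>
    simp only [cvsRuns]
    split_ifs with h
    · rw [ih t, ih 0]
    · rw [ih (t + _), ih (0 + _)]; ring

theorem cvs_invariant (arr : List Int) (x : Int) :
    ∀ (c s e : Int),
    ((PySem.List.enumerate arr e).foldl
      (fun (st : Int × Int) (p : Int × Int) =>
        if p.2 > x then (st.1, p.1 + 1) else (st.1 + (p.1 - st.2 + 1), st.2)) (c, s)).1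
    = c + cvsRuns arr x 0 (e - s) - cvsT (e - s) := by
  induction arr with
  | nil => intro c s e; simp [PySem.List.enumerate_nil, cvsRuns, cvsT]
  | cons v t ih =>
    intro c s e
    rw [PySem.List.enumerate_cons]
    simp only [List.foldl_cons]
    by_cases h : v > x
    · simp only [if_pos h]
      rw [ih c (e + 1) (e + 1)]
      have h1 : e + 1 - (e + 1) = 0 := by ring
      rw [h1]
      have h2 : cvsRuns (v :: t) x 0 (e - s) = cvsT (e - s) + cvsRuns t x 0 0 := by
        simp only [cvsRuns, if_neg (by omega : ¬ v ≤ x)]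
        rw [cvsRuns_total]
        unfold cvsT
        ring
      rw [h2]
      have h0 : cvsT 0 = 0 := by decide
      rw [h0]
      ring
    · simp only [if_neg h]
      rw [ih (c + (e - s + 1)) s (e + 1)]
      simp only [cvsRuns, if_pos (by omega : v ≤ x)]
      have : e + 1 - s = (e - s) + 1 := by ring
      rw [this, cvsT_succ]
      ring

-- ===== VERDICT (by name: the statement is the Claim_ definition above) =====
theorem count_valid_subarrays_spec : Claim_equal_count_valid_subarrays := by
  intro arr x _
  unfold Spec_count_valid_subarrays count_valid_subarrays count_valid_subarrays_alt
  simp only []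
  rw [show ((arr.length : Int)) = 0 + (arr.length : Int) from (zero_add _).symm]
  -- rewrite A's index loop into a loop over (index, value) pairs
  have hmap :
      (PySem.List.pyRange 0 (0 + (arr.length : Int)) 1).foldl
        (fun (st : Int × Int) (e : Int) =>
          if PySem.List.pyGetD arr e 0 > x then (st.1, e + 1)
          else (st.1 + (e - st.2 + 1), st.2)) ((0 : Int), (0 : Int))
      = (PySem.List.enumerate arr 0).foldl
        (fun (st : Int × Int) (p : Int × Int) =>
          if p.2 > x then (st.1, p.1 + 1) else (st.1 + (p.1 - st.2 + 1), st.2)) (0, 0) := by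
    rw [PySem.List.enumerate_eq_map_pyRange (d := 0), List.foldl_map]
    simp
  rw [hmap, cvs_invariant arr x 0 0 0]
  have h0 : cvsT 0 = 0 := by decide
  simp [h0]
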